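-- pv_equiv track=rewrite | github.com/LukaLambrecht/ML4DQMDC-PixelAE | utils/json_utils.py | tuplelist_to_jsondict
-- ===== SOURCE A (Python) =====
-- def plainlist_to_rangelist( plainlist ):
--     ### helper function for tuplelist_to_jsondict, only for internal use
--     # input arguments:
--     # - plainlist: a list of integers in increasing order, must have length >= 2
--     # output:
--     # - a list lists representing ranges
--     # example: [1,2,3,5,6] -> [ [1,3], [5,6] ]
--
--     if len(plainlist)==0: return []
--     if len(plainlist)==1: return [[plainlist[0],plainlist[0]]]
--     start_index = 0
--     stop_index = 1
--     rangelist = []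
--     while stop_index < len(plainlist):
--         if plainlist[stop_index]==plainlist[stop_index-1]+1:
--             stop_index += 1
--         else:
--             rangelist.append( [ plainlist[start_index],plainlist[stop_index-1] ] )
--             start_index = stop_index
--             stop_index = stop_index+1
--     rangelist.append( [ plainlist[start_index],plainlist[stop_index-1] ] )
--     return rangelist
--
-- def tuplelist_to_jsondict( tuplelist ):
--     ### convert a list of tuples of format (run number, [lumisection numbers]) to json dict
--     jsondict = {}
--     for el in tuplelist:
--         runnb = el[0]
--         lslist = el[1]
--         lumiranges = []
--         if( len(lslist)<1 ): continue
--         if( len(lslist)==1 and lslist[0]<0 ): lumiranges = [[lslist[0]]]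
--         elif( len(lslist)==1 ): lumiranges = [[lslist[0],lslist[0]]]
--         else: lumiranges = plainlist_to_rangelist( lslist )
--         jsondict[str(runnb)] = lumiranges
--     return jsondict
-- ===== SOURCE B (Python) =====
-- def tuplelist_to_jsondict(tuplelist):
--     ### convert a list of tuples of format (run number, [lumisection numbers]) to json dict
--     # same result as the two-pointer version, but the ranges are built by an
--     # index-based grouping: the start indices of maximal consecutive runs are
--     # collected in one comprehension, then paired with their end indices.
--     def ranges(p):
--         starts = [i for i in range(len(p)) if i == 0 or p[i] != p[i-1] + 1]
--         ends = starts[1:] + [len(p)]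
--         return [[p[s], p[e-1]] for s, e in zip(starts, ends)]
--     return {str(r): ([[ls[0]]] if len(ls) == 1 and ls[0] < 0 else ranges(ls))
--             for r, ls in tuplelist if len(ls) >= 1}
-- ===== Notes on version B (the rewrite author's own statement) =====
-- stated objective: alternative
-- what changed: The two-pointer while-loop that scans for range breaks is replaced by an index-grouping pass: collect all break (start) indices in one comprehension, pair each with the next start, and map the pairs to [first,last] ranges; the dict is built by a comprehension with the same skip/negative-singleton cases.
import Mathlib
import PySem

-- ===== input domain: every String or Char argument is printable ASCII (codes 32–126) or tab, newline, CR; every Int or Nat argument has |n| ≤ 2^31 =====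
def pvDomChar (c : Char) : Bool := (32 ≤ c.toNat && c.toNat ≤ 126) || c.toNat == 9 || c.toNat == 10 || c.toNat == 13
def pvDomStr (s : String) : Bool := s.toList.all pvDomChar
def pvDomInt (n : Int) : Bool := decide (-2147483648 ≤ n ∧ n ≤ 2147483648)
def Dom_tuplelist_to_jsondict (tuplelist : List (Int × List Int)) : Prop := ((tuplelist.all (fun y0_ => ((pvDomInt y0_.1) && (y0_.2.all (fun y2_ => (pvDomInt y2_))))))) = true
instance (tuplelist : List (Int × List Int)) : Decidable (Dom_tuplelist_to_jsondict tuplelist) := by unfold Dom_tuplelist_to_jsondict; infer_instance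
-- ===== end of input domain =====

-- B replaces the two-pointer while-scan for consecutive ranges by an index-grouping
-- pass (collect break indices, zip with successors); alternative decomposition, same cost.


-- ===== PORT A =====
-- the while loop of plainlist_to_rangelist: state = (start_index, rangelist), stop_index counts up
def pltrLoop (p : List Int) (start stop : Nat) (rangelist : List (List Int)) : List (List Int) :=
  if stop < p.length then
    if p.getD stop 0 == p.getD (stop - 1) 0 + 1 then
      pltrLoop p start (stop + 1) rangelist
    else
      pltrLoop p stop (stop + 1) (rangelist ++ [[p.getD start 0, p.getD (stop - 1) 0]])
  else
    rangelist ++ [[p.getD start 0, p.getD (stop - 1) 0]]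
termination_by p.length - stop

def plainlist_to_rangelist (plainlist : List Int) : List (List Int) :=
  if plainlist.length == 0 then []
  else if plainlist.length == 1 then [[plainlist.getD 0 0, plainlist.getD 0 0]]
  else pltrLoop plainlist 0 1 []

def tuplelist_to_jsondict (tuplelist : List (Int × List Int)) : List (String × List (List Int)) :=
  (tuplelist.foldl (fun (jsondict : PySem.Dict String (List (List Int))) el =>
    let runnb := el.1
    let lslist := el.2
    if lslist.length < 1 then jsondict
    else
      let lumiranges :=
        if lslist.length == 1 && lslist.getD 0 0 < 0 then [[lslist.getD 0 0]]
        else if lslist.length == 1 then [[lslist.getD 0 0, lslist.getD 0 0]]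
        else plainlist_to_rangelist lslist
      jsondict.insert (PySem.Int.toStr runnb) lumiranges) PySem.Dict.empty).items

-- ===== PORT B =====
-- index-grouping: start indices of maximal consecutive runs, zipped with their end indices
def rangesB (p : List Int) : List (List Int) :=
  let starts := (List.range p.length).filter (fun i => i == 0 || !(p.getD i 0 == p.getD (i - 1) 0 + 1))
  let ends := starts.drop 1 ++ [p.length]
  (starts.zip ends).map (fun se => [p.getD se.1 0, p.getD (se.2 - 1) 0])

def tuplelist_to_jsondict_alt (tuplelist : List (Int × List Int)) : List (String × List (List Int)) :=
  (tuplelist.foldl (fun (d : PySem.Dict String (List (List Int))) el =>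
    if el.2.length ≥ 1 then
      d.insert (PySem.Int.toStr el.1)
        (if el.2.length == 1 && el.2.getD 0 0 < 0 then [[el.2.getD 0 0]] else rangesB el.2)
    else d) PySem.Dict.empty).items

-- ===== PRECONDITION & SPEC =====
def Spec_tuplelist_to_jsondict (tuplelist : List (Int × List Int)) (out : List (String × List (List Int))) : Prop := out = tuplelist_to_jsondict_alt tuplelist
instance (tuplelist : List (Int × List Int)) (out : List (String × List (List Int))) : Decidable (Spec_tuplelist_to_jsondict tuplelist out) := by unfold Spec_tuplelist_to_jsondict; infer_instance

-- ===== CLAIM (what is proved, stated in full; the proofs are below) =====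
def Claim_equal_tuplelist_to_jsondict : Prop := ∀ (tuplelist : List (Int × List Int)), Dom_tuplelist_to_jsondict tuplelist → Spec_tuplelist_to_jsondict tuplelist (tuplelist_to_jsondict tuplelist)

-- ===== LEMMAS AND PROOFS =====

-- accumulator-free version of A's loop (for reasoning)
def rangesFrom (p : List Int) (start stop : Nat) : List (List Int) :=
  if stop < p.length then
    if p.getD stop 0 == p.getD (stop - 1) 0 + 1 then
      rangesFrom p start (stop + 1)
    else
      [p.getD start 0, p.getD (stop - 1) 0] :: rangesFrom p stop (stop + 1)
  else
    [[p.getD start 0, p.getD (stop - 1) 0]]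
termination_by p.length - stop

lemma pltrLoop_eq (p : List Int) (start stop : Nat) (acc : List (List Int)) :
    pltrLoop p start stop acc = acc ++ rangesFrom p start stop := by
  fun_induction rangesFrom p start stop generalizing acc with
  | case1 start stop h1 h2 ih =>
      rw [pltrLoop, if_pos h1, if_pos h2, ih]
  | case2 start stop h1 h2 ih =>
      rw [pltrLoop, if_pos h1, if_neg h2, ih]
      simp
  | case3 start stop h1 =>
      rw [pltrLoop, if_neg h1]

-- the break (start) indices of p from index `stop` on
def startsFrom (p : List Int) (stop : Nat) : List Nat :=
  (List.range' stop (p.length - stop)).filter (fun j => !(p.getD j 0 == p.getD (j - 1) 0 + 1))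

-- B's zip-map on a starts list headed by `start`
def zm (p : List Int) (l : List Nat) : List (List Int) :=
  (l.zip (l.drop 1 ++ [p.length])).map (fun se => [p.getD se.1 0, p.getD (se.2 - 1) 0])

lemma startsFrom_ge (p : List Int) (stop : Nat) (h : p.length ≤ stop) :
    startsFrom p stop = [] := by
  simp [startsFrom, Nat.sub_eq_zero_of_le h]

lemma startsFrom_lt (p : List Int) (stop : Nat) (h : stop < p.length) :
    startsFrom p stop =
      if p.getD stop 0 == p.getD (stop - 1) 0 + 1 then startsFrom p (stop + 1)
      else stop :: startsFrom p (stop + 1) := by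
  unfold startsFrom
  have hr : List.range' stop (p.length - stop) = stop :: List.range' (stop + 1) (p.length - (stop + 1)) := by
    have : p.length - stop = (p.length - (stop + 1)) + 1 := by omega
    rw [this, List.range'_succ]
  rw [hr, List.filter_cons]
  by_cases hc : (p.getD stop 0 == p.getD (stop - 1) 0 + 1) = true <;> simp

lemma zm_cons_cons (p : List Int) (a b : Nat) (rest : List Nat) :
    zm p (a :: b :: rest) = [p.getD a 0, p.getD (b - 1) 0] :: zm p (b :: rest) := by
  simp [zm, List.zip]

lemma rangesFrom_eq_zm (p : List Int) (start stop : Nat) (h : stop ≤ p.length) :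
    rangesFrom p start stop = zm p (start :: startsFrom p stop) := by
  fun_induction rangesFrom p start stop with
  | case1 start stop h1 h2 ih =>
      rw [startsFrom_lt p stop h1, h2]
      simp only [if_true]
      exact ih (by omega)
  | case2 start stop h1 h2 ih =>
      rw [startsFrom_lt p stop h1]
      simp only [h2, Bool.false_eq_true, if_false]
      rw [zm_cons_cons, ih (by omega)]
  | case3 start stop h1 =>
      rw [startsFrom_ge p stop (by omega)]
      have hs : stop = p.length := by omega
      subst hs
      simp [zm]

lemma rangesB_eq_rangesFrom (p : List Int) (h : 1 ≤ p.length) :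
    rangesB p = rangesFrom p 0 1 := by
  rw [rangesFrom_eq_zm p 0 1 h]
  unfold rangesB
  have hstarts : (List.range p.length).filter
      (fun i => i == 0 || !(p.getD i 0 == p.getD (i - 1) 0 + 1)) = 0 :: startsFrom p 1 := by
    rw [List.range_eq_range']
    have : List.range' 0 p.length = 0 :: List.range' 1 (p.length - 1) := by
      have hn : p.length = (p.length - 1) + 1 := by omega
      rw [hn, List.range'_succ]; simp
    rw [this, List.filter_cons]
    simp only [beq_self_eq_true, Bool.true_or, if_true]
    congr 1
    unfold startsFrom
    apply List.filter_congr
    intro j hj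
    have hj1 : 1 ≤ j := (List.mem_range'_1.mp hj).1
    simp [Nat.ne_of_gt hj1]
  simp only [hstarts]
  rfl

lemma rangesFrom_singleton (p : List Int) (h : p.length = 1) :
    rangesB p = [[p.getD 0 0, p.getD 0 0]] := by
  rw [rangesB_eq_rangesFrom p (by omega), rangesFrom]
  simp [h]

lemma value_eq (ls : List Int) (h : 1 ≤ ls.length) :
    (if ls.length == 1 && ls.getD 0 0 < 0 then [[ls.getD 0 0]]
     else if ls.length == 1 then [[ls.getD 0 0, ls.getD 0 0]]
     else plainlist_to_rangelist ls) =
    (if ls.length == 1 && ls.getD 0 0 < 0 then [[ls.getD 0 0]] else rangesB ls) := by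
  by_cases hneg : (ls.length == 1 && decide (ls.getD 0 0 < 0)) = true
  · rw [if_pos hneg, if_pos hneg]
  · rw [if_neg hneg, if_neg hneg]
    by_cases h1 : (ls.length == 1) = true
    · rw [if_pos h1]
      exact (rangesFrom_singleton ls (by simpa using h1)).symm
    · rw [if_neg h1]
      unfold plainlist_to_rangelist
      rw [if_neg (by simp only [beq_iff_eq]; omega), if_neg h1, pltrLoop_eq, rangesB_eq_rangesFrom ls h]
      simp

lemma step_eq :
    (fun (jsondict : PySem.Dict String (List (List Int))) (el : Int × List Int) =>
      if el.2.length < 1 then jsondict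
      else
        jsondict.insert (PySem.Int.toStr el.1)
          (if el.2.length == 1 && el.2.getD 0 0 < 0 then [[el.2.getD 0 0]]
           else if el.2.length == 1 then [[el.2.getD 0 0, el.2.getD 0 0]]
           else plainlist_to_rangelist el.2)) =
    (fun (d : PySem.Dict String (List (List Int))) (el : Int × List Int) =>
      if el.2.length ≥ 1 then
        d.insert (PySem.Int.toStr el.1)
          (if el.2.length == 1 && el.2.getD 0 0 < 0 then [[el.2.getD 0 0]] else rangesB el.2)
      else d) := by
  funext d el
  by_cases h : el.2.length < 1
  · rw [if_pos h, if_neg (by omega)]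
  · have h1 : el.2.length ≥ 1 := by omega
    rw [if_neg h, if_pos h1, value_eq el.2 h1]

-- ===== VERDICT (by name: the statement is the Claim_ definition above) =====
theorem tuplelist_to_jsondict_spec : Claim_equal_tuplelist_to_jsondict := by
  intro tuplelist _
  unfold Spec_tuplelist_to_jsondict tuplelist_to_jsondict tuplelist_to_jsondict_alt
  rw [step_eq]
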